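-- pv_equiv track=rewrite | github.com/maxnelso/algorithms_competitions | top_coder/SRM 555/XorBoardDivTwo.py | flipAndScore
-- ===== SOURCE A (Python) =====
-- def flipAndScore(board, row, col):
--   score = 0
--   for i in range(len(board)):
--     for j in range(len(board[i])):
--       if i == row and j == col:
--         score += board[i][j] == "1"
--       elif i == row and j != col:
--         score += board[i][j] == "0"
--       elif i != row and j == col:
--         score += board[i][j] == "0"
--       else:
--         score += board[i][j] == "1"
--   return score
-- ===== SOURCE B (Python) =====
-- def flipAndScore(board, row, col):
--     score = 0
--     for i, s in enumerate(board):
--         if i == row: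
--             score += s.count("0")
--             if 0 <= col < len(s):
--                 c = s[col]
--                 score += (c == "1") - (c == "0")
--         else:
--             score += s.count("1")
--             if 0 <= col < len(s):
--                 c = s[col]
--                 score += (c == "0") - (c == "1")
--     return score
-- ===== Notes on version B (the rewrite author's own statement) =====
-- stated objective: faster
-- what changed: Replaces the per-cell nested Python loop by one pass over rows that uses str.count for each whole row plus a single correction for the cell in the flipped column.
import Mathlib
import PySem

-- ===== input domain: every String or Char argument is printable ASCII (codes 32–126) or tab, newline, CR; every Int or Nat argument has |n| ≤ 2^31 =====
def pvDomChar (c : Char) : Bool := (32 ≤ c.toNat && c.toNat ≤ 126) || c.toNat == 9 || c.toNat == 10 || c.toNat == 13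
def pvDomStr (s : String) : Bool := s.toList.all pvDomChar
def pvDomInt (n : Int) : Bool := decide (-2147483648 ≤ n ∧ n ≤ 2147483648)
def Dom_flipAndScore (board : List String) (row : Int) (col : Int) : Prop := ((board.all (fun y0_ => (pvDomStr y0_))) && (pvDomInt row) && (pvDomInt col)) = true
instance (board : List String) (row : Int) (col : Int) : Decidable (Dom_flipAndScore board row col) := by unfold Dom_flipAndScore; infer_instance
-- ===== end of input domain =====

-- B replaces A's per-cell nested loop by one pass over rows using whole-row character
-- counts plus a single correction for the cell in the flipped column.

-- ===== PORT A =====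
def flipAndScore (board : List String) (row : Int) (col : Int) : Int :=
  (PySem.List.enumerate board).foldl (fun score is =>
    (PySem.List.enumerate is.2.toList).foldl (fun score jc =>
      if is.1 == row && jc.1 == col then score + (if jc.2 == '1' then 1 else 0)
      else if is.1 == row && !(jc.1 == col) then score + (if jc.2 == '0' then 1 else 0)
      else if !(is.1 == row) && jc.1 == col then score + (if jc.2 == '0' then 1 else 0)
      else score + (if jc.2 == '1' then 1 else 0)) score) 0

-- ===== PORT B =====
def flipAndScore_alt (board : List String) (row : Int) (col : Int) : Int :=
  (PySem.List.enumerate board).foldl (fun score is =>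
    if is.1 == row then
      let score := score + (PySem.Str.count is.2 "0" : Int)
      if 0 ≤ col ∧ col < PySem.Str.len is.2 then
        match PySem.Str.pyGet? is.2 col with
        | some c => score + ((if c == '1' then (1 : Int) else 0) - (if c == '0' then 1 else 0))
        | none => score
      else score
    else
      let score := score + (PySem.Str.count is.2 "1" : Int)
      if 0 ≤ col ∧ col < PySem.Str.len is.2 then
        match PySem.Str.pyGet? is.2 col with
        | some c => score + ((if c == '0' then (1 : Int) else 0) - (if c == '1' then 1 else 0))
        | none => score
      else score) 0

-- ===== PRECONDITION & SPEC =====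
def Spec_flipAndScore (board : List String) (row : Int) (col : Int) (out : Int) : Prop := out = flipAndScore_alt board row col
instance (board : List String) (row : Int) (col : Int) (out : Int) : Decidable (Spec_flipAndScore board row col out) := by unfold Spec_flipAndScore; infer_instance

-- ===== CLAIM (what is proved, stated in full; the proofs are below) =====
def Claim_equal_flipAndScore : Prop := ∀ (board : List String) (row : Int) (col : Int), Dom_flipAndScore board row col → Spec_flipAndScore board row col (flipAndScore board row col)

-- ===== LEMMAS AND PROOFS =====

-- Counting a single character as a substring is List.count.
theorem pv_countgo_single (c : Char) : ∀ (fuel : Nat) (cs : List Char) (acc : Nat),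
    cs.length ≤ fuel → PySem.Chars.count.go [c] fuel cs acc = acc + cs.count c := by
  intro fuel
  induction fuel with
  | zero =>
    intro cs acc h
    cases cs with
    | nil => simp [PySem.Chars.count.go]
    | cons a t => simp at h
  | succ n ih =>
    intro cs acc h
    cases cs with
    | nil => simp [PySem.Chars.count.go]
    | cons a t =>
      have hgo : PySem.Chars.count.go [c] (n + 1) (a :: t) acc =
          if c == a then PySem.Chars.count.go [c] n t (acc + 1)
          else PySem.Chars.count.go [c] n t acc := by
        simp [PySem.Chars.count.go, List.isPrefixOf]
      rw [hgo]
      by_cases hac : c = a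
      · rw [if_pos (by simp [hac]), ih t (acc + 1) (by simp at h; omega)]
        subst hac; simp [List.count_cons]; omega
      · rw [if_neg (by simp [hac]), ih t acc (by simp at h; omega)]
        simp [List.count_cons, Ne.symm hac]

theorem pv_count_single (cs : List Char) (c : Char) :
    PySem.Chars.count cs [c] = cs.count c := by
  simp [PySem.Chars.count, pv_countgo_single c cs.length cs 0 le_rfl]

-- per-cell values
def pvO (c : Char) : Int := if c == '1' then 1 else 0
def pvZ (c : Char) : Int := if c == '0' then 1 else 0
def pvCorr (b : Bool) (c : Char) : Int := if b then pvO c - pvZ c else pvZ c - pvO c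

-- A's inner loop over one row, characterised.
theorem pv_inner (row col : Int) (b : Bool) : ∀ (cs : List Char) (j0 : Nat) (acc : Int),
    (PySem.List.enumerate cs (j0 : Int)).foldl (fun score jc =>
      if b && jc.1 == col then score + pvO jc.2
      else if b && !(jc.1 == col) then score + pvZ jc.2
      else if !b && jc.1 == col then score + pvZ jc.2
      else score + pvO jc.2) acc
    = acc + (if b then (cs.count '0' : Int) else (cs.count '1' : Int))
        + (if (j0 : Int) ≤ col ∧ col < (j0 : Int) + cs.length then
             pvCorr b (cs.getD (col.toNat - j0) ' ') else 0) := by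
  intro cs
  induction cs with
  | nil =>
    intro j0 acc
    have : ¬ ((j0 : Int) ≤ col ∧ col < (j0 : Int) + ([] : List Char).length) := by
      simp only [List.length_nil]; push_cast; omega
    simp [PySem.List.enumerate_nil, this]
  | cons a t ih =>
    intro j0 acc
    rw [PySem.List.enumerate_cons, List.foldl_cons]
    have hcast : ((j0 : Int) + 1) = ((j0 + 1 : Nat) : Int) := by push_cast; ring
    rw [hcast, ih (j0 + 1)]
    by_cases hc : (j0 : Int) = col
    · -- the flipped-column cell is the head
      have hb1 : (((j0 : Int)) == col) = true := by simp [hc]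
      have hcond : ((j0 : Int) ≤ col ∧ col < (j0 : Int) + ((a :: t) : List Char).length) := by
        simp only [List.length_cons]; push_cast; omega
      have hnot : ¬ (((j0 + 1 : Nat) : Int) ≤ col ∧ col < ((j0 + 1 : Nat) : Int) + (t : List Char).length) := by
        push_cast; omega
      have hidx : col.toNat - j0 = 0 := by omega
      simp only [hb1, Bool.and_true, Bool.not_true, Bool.and_false, hnot, if_neg, hcond, if_pos,
        hidx, List.getD_cons_zero, List.count_cons]
      cases b <;> simp [pvCorr, pvO, pvZ] <;> split_ifs <;> push_cast <;> omega
    · have hb1 : (((j0 : Int)) == col) = false := by simp [hc]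
      have hsame : ((j0 : Int) ≤ col ∧ col < (j0 : Int) + ((a :: t) : List Char).length)
          ↔ (((j0 + 1 : Nat) : Int) ≤ col ∧ col < ((j0 + 1 : Nat) : Int) + (t : List Char).length) := by
        simp only [List.length_cons]; push_cast; constructor <;> intro h <;> omega
      by_cases hin : ((j0 : Int) ≤ col ∧ col < (j0 : Int) + ((a :: t) : List Char).length)
      · have hin' := hsame.mp hin
        have hk : ∃ k, col.toNat - j0 = k + 1 := by
          have : j0 < col.toNat := by omega
          exact ⟨col.toNat - j0 - 1, by omega⟩
        obtain ⟨k, hk⟩ := hk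
        have hk' : col.toNat - (j0 + 1) = k := by omega
        simp only [hb1, Bool.and_false, Bool.not_false, hin, if_pos, hin', hk, hk',
          List.getD_cons_succ, List.count_cons]
        cases b <;> simp [pvO, pvZ] <;> split_ifs <;> push_cast <;> omega
      · have hin' : ¬ (((j0 + 1 : Nat) : Int) ≤ col ∧ col < ((j0 + 1 : Nat) : Int) + (t : List Char).length) := by
          rw [← hsame]; exact hin
        simp only [hb1, Bool.and_false, Bool.not_false, hin, if_neg, hin', List.count_cons]
        cases b <;> simp [pvO, pvZ] <;> split_ifs <;> push_cast <;> omega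

-- The two row-step functions agree.
theorem pv_step (row col : Int) (acc : Int) (i : Int) (s : String) :
    (PySem.List.enumerate s.toList).foldl (fun score jc =>
      if (i == row) && jc.1 == col then score + (if jc.2 == '1' then 1 else 0)
      else if (i == row) && !(jc.1 == col) then score + (if jc.2 == '0' then 1 else 0)
      else if !(i == row) && jc.1 == col then score + (if jc.2 == '0' then 1 else 0)
      else score + (if jc.2 == '1' then 1 else 0)) acc
    = (if i == row then
        let score := acc + (PySem.Str.count s "0" : Int)
        if 0 ≤ col ∧ col < PySem.Str.len s then
          match PySem.Str.pyGet? s col with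
          | some c => score + ((if c == '1' then (1 : Int) else 0) - (if c == '0' then 1 else 0))
          | none => score
        else score
      else
        let score := acc + (PySem.Str.count s "1" : Int)
        if 0 ≤ col ∧ col < PySem.Str.len s then
          match PySem.Str.pyGet? s col with
          | some c => score + ((if c == '0' then (1 : Int) else 0) - (if c == '1' then 1 else 0))
          | none => score
        else score) := by
  have h0 : ((0 : Nat) : Int) = 0 := rfl
  have := pv_inner row col (i == row) s.toList 0 acc
  rw [h0] at this
  simp only [pvO, pvZ, pvCorr] at this
  rw [show (PySem.List.enumerate s.toList) = (PySem.List.enumerate s.toList (0:Int)) from rfl, this]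
  have hlen : PySem.Str.len s = (s.toList.length : Int) := by
    simp [PySem.Str.len_eq, PySem.Chars.len]
  by_cases hin : 0 ≤ col ∧ col < (s.toList.length : Int)
  · have hlt : col.toNat < s.toList.length := by omega
    have hget : PySem.List.pyGet? s.toList col = some (s.toList.getD col.toNat ' ') := by
      rw [show col = ((col.toNat : Nat) : Int) by omega, PySem.List.pyGet?_natCast,
        List.getD_eq_getElem?_getD]
      have hmax : (max col 0).toNat = col.toNat := by omega
      simp [hmax, List.getElem?_eq_getElem hlt]
    have hin0 : (0 : Int) ≤ col ∧ col < 0 + (s.toList.length : Int) := by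
      constructor <;> omega
    have hsl : s.toList.length = s.length := by simp
    rw [hsl] at hin hin0
    cases hbr : (i == row) <;>
      simp [hbr, hin, hin0, hget, hlen, hsl, pv_count_single] <;> split_ifs <;> omega
  · have hz : ¬ ((0 : Int) ≤ col ∧ col < (0 : Int) + (s.toList.length : Int)) := by
      push_cast at hin ⊢; omega
    have hsl : s.toList.length = s.length := by simp
    rw [hsl] at hin hz
    cases hbr : (i == row) <;>
      simp [hbr, hin, hz, hlen, hsl, pv_count_single]

-- ===== VERDICT (by name: the statement is the Claim_ definition above) =====
theorem pv_foldl_ext {α β : Type} (f g : β → α → β) (h : ∀ b a, f b a = g b a) :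
    ∀ (l : List α) (b : β), l.foldl f b = l.foldl g b := by
  intro l
  induction l with
  | nil => intro b; rfl
  | cons x xs ih => intro b; simp only [List.foldl_cons, h b x, ih]

theorem flipAndScore_spec : Claim_equal_flipAndScore := by
  intro board row col _
  unfold Spec_flipAndScore flipAndScore flipAndScore_alt
  exact pv_foldl_ext _ _ (fun (acc : Int) (is : Int × String) => pv_step row col acc is.1 is.2) _ 0
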